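-- pv_equiv track=rewrite | github.com/Barsik-Barbosik/Tone-Mutant | syntax_highlighters/sysex_highlighter.py | _find_space_positions
-- ===== SOURCE A (Python) =====
-- def _find_space_positions(text):
--     """Find and return the positions of spaces in the text."""
--     positions = [0]
--     index = -1
--     while True:
--         try:
--             index = text.index(" ", index + 1)
--             if index > 0 and text[index - 1] == " ":
--                 continue
--             positions.append(index)
--         except ValueError:
--             break
--     return positions
-- ===== SOURCE B (Python) =====
-- def _find_space_positions(text):
--     """Find and return the positions of spaces in the text."""
--     pairs = zip(text, "x" + text)  # each char paired with its predecessor ('x' sentinel before index 0)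
--     return [0] + [i for i, (c, prev) in enumerate(pairs) if c == " " and prev != " "]
-- ===== Notes on version B (the rewrite author's own statement) =====
-- stated objective: idiomatic
-- what changed: Replaced the exception-driven while-loop that repeatedly calls str.index and looks back at text[index-1] with a single comprehension over the text zipped with its shifted self, selecting indices whose char is a space and whose predecessor is not.
import Mathlib
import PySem

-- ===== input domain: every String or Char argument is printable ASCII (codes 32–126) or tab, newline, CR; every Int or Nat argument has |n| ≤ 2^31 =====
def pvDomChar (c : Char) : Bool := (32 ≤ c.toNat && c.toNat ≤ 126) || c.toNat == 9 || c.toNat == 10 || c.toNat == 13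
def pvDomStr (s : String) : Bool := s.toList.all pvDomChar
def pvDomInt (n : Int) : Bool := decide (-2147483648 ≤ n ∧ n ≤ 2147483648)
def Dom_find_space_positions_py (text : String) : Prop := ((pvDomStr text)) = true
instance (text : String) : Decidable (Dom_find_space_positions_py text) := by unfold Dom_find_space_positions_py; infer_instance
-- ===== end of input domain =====

-- B replaces A's exception-driven str.index while-loop with one comprehension over the
-- text zipped with its shifted self (objective: idiomatic). Return values only; no mutation.

-- ===== PORT A =====
-- A's 'while True: index = text.index(" ", index + 1) …' loop; the fuel argument only
-- totalises it (each found index is at least the previous start, so length+1 iterations suffice).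
def pvLoopA (cs : List Char) (fuel : Nat) (positions : List Int) (index : Int) : List Int :=
  match fuel with
  | 0 => positions
  | fuel + 1 =>
    let j := PySem.Chars.findFrom cs [' '] (index + 1) none
    if j = -1 then positions            -- ValueError → break
    else if j > 0 ∧ PySem.List.pyGet? cs (j - 1) = some ' ' then
      pvLoopA cs fuel positions j       -- continue
    else
      pvLoopA cs fuel (positions ++ [j]) j

def find_space_positions_py (text : String) : List Int :=
  pvLoopA text.toList (text.toList.length + 1) [0] (-1)

-- ===== PORT B =====
-- [0] + [i for i, (c, prev) in enumerate(zip(text, "x" + text)) if c == " " and prev != " "]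
def find_space_positions_py_alt (text : String) : List Int :=
  0 :: (PySem.List.enumerate (text.toList.zip ('x' :: text.toList)) 0).filterMap
        (fun ip => if ip.2.1 = ' ' ∧ ip.2.2 ≠ ' ' then some ip.1 else none)

-- ===== PRECONDITION & SPEC =====
def Spec_find_space_positions_py (text : String) (out : List Int) : Prop := out = find_space_positions_py_alt text
instance (text : String) (out : List Int) : Decidable (Spec_find_space_positions_py text out) := by unfold Spec_find_space_positions_py; infer_instance

-- ===== CLAIM (what is proved, stated in full; the proofs are below) =====
def Claim_equal_find_space_positions_py : Prop := ∀ (text : String), Dom_find_space_positions_py text → Spec_find_space_positions_py text (find_space_positions_py text)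

-- ===== LEMMAS AND PROOFS =====

-- proof-side form of B's comprehension: a scan with the previous character threaded through
def pvScan (p : Char) : List Char → Int → List Int
  | [], _ => []
  | c :: cs, i => if c = ' ' ∧ p ≠ ' ' then i :: pvScan c cs (i + 1) else pvScan c cs (i + 1)

theorem pvScan_append (xs ys : List Char) (p : Char) (i : Int) (h : ' ' ∉ xs) :
    pvScan p (xs ++ ys) i = pvScan (xs.getLastD p) ys (i + xs.length) := by
  induction xs generalizing p i with
  | nil => simp [List.getLastD]
  | cons c cs ih =>
    have hc : ¬ (c = ' ' ∧ p ≠ ' ') := by simp at h; tauto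
    simp only [List.cons_append, pvScan, if_neg hc]
    rw [ih _ _ (by simp at h; tauto), List.getLastD_cons]
    congr 1
    push_cast [List.length_cons]; ring

theorem pvScan_no_space (xs : List Char) (p : Char) (i : Int) (h : ' ' ∉ xs) :
    pvScan p xs i = [] := by
  simpa [pvScan] using pvScan_append xs [] p i h

theorem pvGet_in_range (cs : List Char) (i : Int) (h0 : 0 ≤ i) (h : i.toNat < cs.length) :
    PySem.List.pyGet? cs i = some (cs[i.toNat]) := by
  have hi : i < (cs.length : Int) := by omega
  simp [PySem.List.pyGet?, PySem.List.pyIdx?, h0, hi, h]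

theorem pvMain (fuel : Nat) (cs : List Char) (k : Nat) (p : Char) (acc : List Int)
    (hk : k ≤ cs.length) (hf : cs.length - k < fuel)
    (hp0 : k = 0 → p ≠ ' ') (hp1 : ∀ h : 0 < k, p = cs[k - 1]'(by omega)) :
    pvLoopA cs fuel acc ((k : Int) - 1) = acc ++ pvScan p (cs.drop k) k := by
  induction fuel generalizing k p acc with
  | zero => omega
  | succ n ih =>
    have hstart : ((k : Int) - 1 + 1) = (k : Int) := by ring
    rw [pvLoopA]
    simp only [hstart]
    rw [PySem.Chars.findFrom_natCast cs [' '] k hk]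
    by_cases hfind : PySem.Chars.find (cs.drop k) [' '] = -1
    · rw [if_pos hfind, if_pos rfl]
      have hns : ' ' ∉ cs.drop k := by
        have := (PySem.Chars.find_eq_neg_one_iff (cs.drop k) [' ']).mp hfind
        simpa [List.singleton_infix_iff] using this
      rw [pvScan_no_space _ _ _ hns, List.append_nil]
    · have hF0 : 0 ≤ PySem.Chars.find (cs.drop k) [' '] := by
        have := PySem.Chars.neg_one_le_find (cs.drop k) [' ']
        omega
      set F := PySem.Chars.find (cs.drop k) [' '] with hFdef
      set f := F.toNat with hfdef
      have hFf : F = (f : Int) := by omega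
      obtain ⟨hpre, hmin⟩ := PySem.Chars.find_spec (s := cs.drop k) (sub := [' ']) hF0
      have hflen : k + f < cs.length := by
        have hne : (cs.drop k).drop f ≠ [] := by
          rcases hpre with ⟨t, ht⟩; rw [← ht]; simp
        have := List.length_pos_of_ne_nil hne
        simp at this
        omega
      have hdropf : (cs.drop k).drop f = cs.drop (k + f) := by
        rw [List.drop_drop]
      have hhead : cs.drop (k + f) = cs[k + f] :: cs.drop (k + f + 1) := by
        rw [List.drop_eq_getElem_cons hflen]
      have hspace : cs[k + f]'hflen = ' ' := by
        rcases hpre with ⟨t, ht⟩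
        rw [hdropf, hhead] at ht
        have ht2 : (' ' :: t) = cs[k + f] :: cs.drop (k + f + 1) := by
          simpa only [List.singleton_append] using ht
        exact (List.cons.inj ht2).1.symm
      set xs := (cs.drop k).take f with hxsdef
      have hxslen : xs.length = f := by
        simp [hxsdef]; omega
      have hnspace : ' ' ∉ xs := by
        intro hmem
        obtain ⟨i, hi, hx⟩ := List.getElem_of_mem hmem
        have hi' : i < f := by omega
        have hgi : (cs.drop k)[i]'(by simp; omega) = ' ' := by
          rw [← hx]; simp [hxsdef]
        apply hmin i (by omega)
        have hstep : (cs.drop k).drop i = ' ' :: (cs.drop k).drop (i + 1) := by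
          rw [List.drop_eq_getElem_cons (by simp; omega), hgi]
        rw [hstep]
        exact ⟨_, rfl⟩
      have hdecomp : cs.drop k = xs ++ cs.drop (k + f) := by
        rw [hxsdef, ← hdropf, List.take_append_drop]
      set p' := xs.getLastD p with hp'def
      have hbound : k + f - 1 < cs.length := by omega
      have hprev : 0 < k + f → p' = cs[k + f - 1]'hbound := by
        intro hkf
        by_cases hfz : f = 0
        · have hxnil : xs = [] := List.eq_nil_of_length_eq_zero (by omega)
          have hk0 : 0 < k := by omega
          rw [hp'def, hxnil]
          simp only [List.getLastD_nil]
          rw [hp1 hk0]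
          congr 1
          omega
        · have hxne : xs ≠ [] := by
            intro hc; rw [hc] at hxslen; simp at hxslen; omega
          rw [hp'def, List.getLastD_eq_getLast?, List.getLast?_eq_some_getLast hxne,
            Option.getD_some, List.getLast_eq_getElem]
          have hidx : xs.length - 1 < (cs.drop k).length := by simp; omega
          rw [List.getElem_take]
          rw [List.getElem_drop]
          congr 1
          omega
      -- reduce the loop's if-conditions
      rw [if_neg hfind, if_neg (by omega : ¬ (↑k + F = -1)), hFf]
      have hget : 0 < k + f → PySem.List.pyGet? cs ((k : Int) + ↑f - 1) = some (cs[k + f - 1]'hbound) := by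
        intro hkf
        have hidx : ((k : Int) + ↑f - 1) = ((k + f - 1 : Nat) : Int) := by push_cast; omega
        rw [hidx, pvGet_in_range _ _ (by positivity) (by simpa using hbound)]
        simp
      -- the scan side
      have hscan : pvScan p (cs.drop k) ↑k
          = if p' ≠ ' ' then ((k : Int) + f) :: pvScan ' ' (cs.drop (k + f + 1)) (↑k + ↑f + 1)
            else pvScan ' ' (cs.drop (k + f + 1)) (↑k + ↑f + 1) := by
        rw [hdecomp, pvScan_append xs _ p ↑k hnspace, hxslen, hhead, hspace, ← hp'def]
        simp only [pvScan]
        split_ifs with h1 h2 h3 <;> tauto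
      -- recursive call via the induction hypothesis at k + f + 1
      have hreck : (k : Int) + ↑f = ((k + f + 1 : Nat) : Int) - 1 := by push_cast; ring
      have hih := fun (acc' : List Int) => ih (k + f + 1) ' ' acc' (by omega) (by omega)
        (by omega) (by intro h; simp [hspace])
      have hscan' : pvScan ' ' (cs.drop (k + f + 1)) ((k + f + 1 : Nat) : Int)
          = pvScan ' ' (cs.drop (k + f + 1)) (↑k + ↑f + 1) := by
        norm_cast
      by_cases hC : ((k : Int) + ↑f > 0 ∧ PySem.List.pyGet? cs ((k : Int) + ↑f - 1) = some ' ')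
      · -- A skips (previous char is a space); B's scan also emits nothing here
        rw [if_pos hC, hreck, hih acc, hscan]
        have hkf : 0 < k + f := by
          rcases hC with ⟨h1, _⟩; omega
        have hp's : p' = ' ' := by
          rcases hC with ⟨_, h2⟩
          rw [hget hkf] at h2
          rw [hprev hkf]
          exact Option.some.inj h2
        rw [if_neg (by simp [hp's]), hscan']
      · rw [if_neg hC, hreck, hih (acc ++ [((k + f + 1 : Nat) : Int) - 1]), hscan]
        have hp's : p' ≠ ' ' := by
          intro hc
          apply hC
          have hkf : 0 < k + f := by
            by_contra hkf0
            have hk0 : k = 0 := by omega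
            apply hp0 hk0
            rw [← hc, hp'def]
            have hxnil : xs = [] := List.eq_nil_of_length_eq_zero (by omega)
            rw [hxnil]; simp
          refine ⟨by omega, ?_⟩
          rw [hget hkf, ← hprev hkf, hc]
        rw [if_pos hp's, List.append_assoc, List.singleton_append, hscan']
        congr 2
        push_cast; ring

-- B's comprehension over enumerate(zip(text, "x" + text)) equals the threaded scan
theorem pvAlt_eq_scan (cs : List Char) (p : Char) (i : Int) :
    (PySem.List.enumerate (cs.zip (p :: cs)) i).filterMap
        (fun ip => if ip.2.1 = ' ' ∧ ip.2.2 ≠ ' ' then some ip.1 else none)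
      = pvScan p cs i := by
  induction cs generalizing p i with
  | nil => simp [pvScan, PySem.List.enumerate_nil]
  | cons c cs ih =>
    simp only [List.zip_cons_cons, PySem.List.enumerate_cons, List.filterMap_cons, pvScan]
    split_ifs <;> simp_all

-- ===== VERDICT (by name: the statement is the Claim_ definition above) =====
theorem find_space_positions_py_spec : Claim_equal_find_space_positions_py := by
  unfold Claim_equal_find_space_positions_py
  intro text _
  unfold Spec_find_space_positions_py find_space_positions_py find_space_positions_py_alt
  rw [pvAlt_eq_scan]
  have h := pvMain (text.toList.length + 1) text.toList 0 'x' [0]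
    (by omega) (by omega) (fun _ => by decide) (fun h => absurd h (by omega))
  simpa using h
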